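-- pv_equiv track=rewrite | github.com/vishwaksen21/signaction | mvp_text_to_sign.py | apply_phrases
-- ===== SOURCE A (Python) =====
-- PHRASES = {
--     "THANK YOU": "THANK_YOU",
--     "GOOD MORNING": "GOOD_MORNING",
--     "GOOD NIGHT": "GOOD_NIGHT",
--     "HOW ARE YOU": "HOW_ARE_YOU",
-- }
--
-- def apply_phrases(tokens: list[str]) -> list[str]:
--     # Greedy longest phrase match (space-joined)
--     if not tokens:
--         return []
--
--     phrase_parts = [(k.split(), v) for k, v in PHRASES.items()]
--     phrase_parts.sort(key=lambda x: len(x[0]), reverse=True)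
--
--     i = 0
--     out: list[str] = []
--     while i < len(tokens):
--         matched = False
--         for parts, repl in phrase_parts:
--             n = len(parts)
--             if i + n <= len(tokens) and tokens[i : i + n] == parts:
--                 out.append(repl)
--                 i += n
--                 matched = True
--                 break
--         if not matched:
--             out.append(tokens[i])
--             i += 1
--     return out
-- ===== SOURCE B (Python) =====
-- PHRASES = {
--     "THANK YOU": "THANK_YOU",
--     "GOOD MORNING": "GOOD_MORNING",
--     "GOOD NIGHT": "GOOD_NIGHT",
--     "HOW ARE YOU": "HOW_ARE_YOU",
-- }
--
--
-- def apply_phrases(tokens: list[str]) -> list[str]: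
--     # Pattern-matching decision tree over a 3-token lookahead window:
--     # the fixed phrases are literal match-statement patterns, longest first;
--     # no phrase table, no sorting, no inner scan over phrases.
--     out: list[str] = []
--     i = 0
--     n = len(tokens)
--     while i < n:
--         match tokens[i:i + 3]:
--             case ["HOW", "ARE", "YOU"]:
--                 out.append("HOW_ARE_YOU")
--                 i += 3
--             case ["THANK", "YOU", *_]:
--                 out.append("THANK_YOU")
--                 i += 2
--             case ["GOOD", "MORNING", *_]:
--                 out.append("GOOD_MORNING")
--                 i += 2
--             case ["GOOD", "NIGHT", *_]:
--                 out.append("GOOD_NIGHT")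
--                 i += 2
--             case [t, *_]:
--                 out.append(t)
--                 i += 1
--     return out
-- ===== Notes on version B (the rewrite author's own statement) =====
-- stated objective: idiomatic
-- what changed: Replaces A's phrase table (dict items split into token lists, sorted by length, inner for-loop comparing each window slice against every phrase) with a pattern-matching decision tree: the fixed phrases are literal match-statement patterns on a 3-token lookahead window, tried longest first, with no table, no sorting and no inner scan over phrases.
import Mathlib
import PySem

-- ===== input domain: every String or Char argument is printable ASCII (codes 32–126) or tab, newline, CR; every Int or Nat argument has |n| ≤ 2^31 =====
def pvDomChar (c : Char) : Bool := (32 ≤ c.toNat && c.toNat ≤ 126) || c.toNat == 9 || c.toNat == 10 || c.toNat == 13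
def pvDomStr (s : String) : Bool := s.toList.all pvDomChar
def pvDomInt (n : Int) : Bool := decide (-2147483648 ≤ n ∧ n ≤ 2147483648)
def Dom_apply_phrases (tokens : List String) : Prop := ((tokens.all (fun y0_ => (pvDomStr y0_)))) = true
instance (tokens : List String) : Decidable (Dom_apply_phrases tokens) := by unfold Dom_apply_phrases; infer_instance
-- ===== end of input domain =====

-- B replaces A's phrase table + sort + inner scan with slice comparisons by a
-- structural pattern-matching state machine over the remaining token suffix
-- (the fixed phrases are literal patterns, longest first); same return value.

-- ===== PORT A =====

-- module constant PHRASES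
def pvPHRASES : PySem.Dict String String :=
  PySem.Dict.ofList
    [("THANK YOU", "THANK_YOU"),
     ("GOOD MORNING", "GOOD_MORNING"),
     ("GOOD NIGHT", "GOOD_NIGHT"),
     ("HOW ARE YOU", "HOW_ARE_YOU")]

-- phrase_parts = [(k.split(), v) for k, v in PHRASES.items()]; phrase_parts.sort(key=len parts, reverse=True)
def pvPhrasePartsA : List (List String × String) :=
  PySem.List.sorted (pvPHRASES.items.map (fun kv => (PySem.Str.split₀ kv.1, kv.2)))
    (fun x => (x.1.length : Int)) true

-- the inner 'for parts, repl in phrase_parts' loop: first match, with its (repl, n)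
def pvFindA (tokens : List String) (i : Nat) : List (List String × String) → Option (String × Nat)
  | [] => none
  | (parts, repl) :: rest =>
      let n := parts.length
      if i + n ≤ tokens.length ∧
         PySem.List.slice tokens (some (i : Int)) (some ((i : Int) + (n : Int))) = parts then
        some (repl, n)
      else pvFindA tokens i rest

-- needed by the while-loop's termination: any match advances i by n ≥ 1
theorem pvFindA_pos (tokens : List String) (i : Nat) (r : String) (n : Nat)
    (h : pvFindA tokens i pvPhrasePartsA = some (r, n)) : 0 < n := by
  have hl : pvPhrasePartsA =
      [(["HOW", "ARE", "YOU"], "HOW_ARE_YOU"),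
       (["THANK", "YOU"], "THANK_YOU"),
       (["GOOD", "MORNING"], "GOOD_MORNING"),
       (["GOOD", "NIGHT"], "GOOD_NIGHT")] := by decide
  rw [hl] at h
  simp only [pvFindA] at h
  split_ifs at h <;> simp_all <;> omega

-- the while loop of A (state i, out)
def pvLoopA (tokens : List String) (i : Nat) (out : List String) : List String :=
  if h : i < tokens.length then
    match hf : pvFindA tokens i pvPhrasePartsA with
    | some (repl, n) => pvLoopA tokens (i + n) (out ++ [repl])
    | none => pvLoopA tokens (i + 1) (out ++ [(PySem.List.pyGet? tokens (i : Int)).getD ""])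
  else out
termination_by tokens.length - i
decreasing_by
  · have := pvFindA_pos tokens i repl n hf; omega
  · omega

def apply_phrases (tokens : List String) : List String :=
  if tokens = [] then [] else pvLoopA tokens 0 []

-- ===== PORT B =====

-- B's 'while i < n: match tokens[i:i+3]:' loop (state i, out); the phrases are
-- literal patterns on the 3-token window, longest first; default consumes one token
def pvLoopB (tokens : List String) (i : Nat) (out : List String) : List String :=
  if h : i < tokens.length then
    match PySem.List.slice tokens (some (i : Int)) (some ((i : Int) + 3)) with
    | ["HOW", "ARE", "YOU"] => pvLoopB tokens (i + 3) (out ++ ["HOW_ARE_YOU"])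
    | "THANK" :: "YOU" :: _ => pvLoopB tokens (i + 2) (out ++ ["THANK_YOU"])
    | "GOOD" :: "MORNING" :: _ => pvLoopB tokens (i + 2) (out ++ ["GOOD_MORNING"])
    | "GOOD" :: "NIGHT" :: _ => pvLoopB tokens (i + 2) (out ++ ["GOOD_NIGHT"])
    | t :: _ => pvLoopB tokens (i + 1) (out ++ [t])
    | [] => out
  else out
termination_by tokens.length - i
decreasing_by all_goals omega

def apply_phrases_alt (tokens : List String) : List String :=
  pvLoopB tokens 0 []

-- ===== PRECONDITION & SPEC =====
def Spec_apply_phrases (tokens : List String) (out : List String) : Prop := out = apply_phrases_alt tokens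
instance (tokens : List String) (out : List String) : Decidable (Spec_apply_phrases tokens out) := by unfold Spec_apply_phrases; infer_instance

-- ===== CLAIM (what is proved, stated in full; the proofs are below) =====
def Claim_equal_apply_phrases : Prop := ∀ (tokens : List String), Dom_apply_phrases tokens → Spec_apply_phrases tokens (apply_phrases tokens)

-- ===== LEMMAS AND PROOFS =====

-- one step of B's match when 3 or more tokens remain, as an if-chain
theorem pvLoopB_char3 (tokens : List String) (i : Nat) (out : List String)
    (a b c : String) (r : List String)
    (h : i < tokens.length) (hdd : tokens.drop i = a :: b :: c :: r) :
    pvLoopB tokens i out =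
      if a = "HOW" ∧ b = "ARE" ∧ c = "YOU" then pvLoopB tokens (i + 3) (out ++ ["HOW_ARE_YOU"])
      else if a = "THANK" ∧ b = "YOU" then pvLoopB tokens (i + 2) (out ++ ["THANK_YOU"])
      else if a = "GOOD" ∧ b = "MORNING" then pvLoopB tokens (i + 2) (out ++ ["GOOD_MORNING"])
      else if a = "GOOD" ∧ b = "NIGHT" then pvLoopB tokens (i + 2) (out ++ ["GOOD_NIGHT"])
      else pvLoopB tokens (i + 1) (out ++ [a]) := by
  have hs : PySem.List.slice tokens (some (i : Int)) (some ((i : Int) + 3)) = [a, b, c] := by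
    have hgen := PySem.List.slice_natCast_add tokens i 3
    push_cast at hgen
    rw [hgen, hdd]; rfl
  conv_lhs => rw [pvLoopB.eq_def]
  simp only [dif_pos h, hs]
  split
  · rename_i heq; injection heq with h1 h2; injection h2 with h2 h3; injection h3 with h3 _
    subst h1 h2 h3; simp
  · rename_i heq; injection heq with h1 h2; injection h2 with h2 _
    subst h1 h2; simp
  · rename_i heq; injection heq with h1 h2; injection h2 with h2 _
    subst h1 h2; simp
  · rename_i heq; injection heq with h1 h2; injection h2 with h2 _
    subst h1 h2; simp
  · rename_i hx1 hx2 hx3 hx4 heq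
    injection heq with h1 h2; subst h1; subst h2
    split_ifs with g1 g2 g3 g4
    · exact (hx1 g1.1 (by rw [g1.2.1, g1.2.2])).elim
    · exact (hx2 [c] g2.1 (by rw [g2.2])).elim
    · exact (hx3 [c] g3.1 (by rw [g3.2])).elim
    · exact (hx4 [c] g4.1 (by rw [g4.2])).elim
    · rfl
  · rename_i heq; exact absurd heq (by simp)

-- one step of B's match when exactly 2 tokens remain
theorem pvLoopB_char2 (tokens : List String) (i : Nat) (out : List String)
    (a b : String)
    (h : i < tokens.length) (hdd : tokens.drop i = [a, b]) :
    pvLoopB tokens i out =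
      if a = "THANK" ∧ b = "YOU" then pvLoopB tokens (i + 2) (out ++ ["THANK_YOU"])
      else if a = "GOOD" ∧ b = "MORNING" then pvLoopB tokens (i + 2) (out ++ ["GOOD_MORNING"])
      else if a = "GOOD" ∧ b = "NIGHT" then pvLoopB tokens (i + 2) (out ++ ["GOOD_NIGHT"])
      else pvLoopB tokens (i + 1) (out ++ [a]) := by
  have hs : PySem.List.slice tokens (some (i : Int)) (some ((i : Int) + 3)) = [a, b] := by
    have hgen := PySem.List.slice_natCast_add tokens i 3
    push_cast at hgen
    rw [hgen, hdd]; rfl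
  conv_lhs => rw [pvLoopB.eq_def]
  simp only [dif_pos h, hs]
  split
  · rename_i heq; injection heq with _ h2; injection h2 with _ h3; simp at h3
  · rename_i heq; injection heq with h1 h2; injection h2 with h2 _
    subst h1 h2; simp
  · rename_i heq; injection heq with h1 h2; injection h2 with h2 _
    subst h1 h2; simp
  · rename_i heq; injection heq with h1 h2; injection h2 with h2 _
    subst h1 h2; simp
  · rename_i hx1 hx2 hx3 hx4 heq
    injection heq with h1 h2; subst h1; subst h2
    split_ifs with g1 g2 g3
    · exact (hx2 [] g1.1 (by rw [g1.2])).elim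
    · exact (hx3 [] g2.1 (by rw [g2.2])).elim
    · exact (hx4 [] g3.1 (by rw [g3.2])).elim
    · rfl
  · rename_i heq; exact absurd heq (by simp)

-- one step of B's match when exactly 1 token remains
theorem pvLoopB_char1 (tokens : List String) (i : Nat) (out : List String)
    (a : String)
    (h : i < tokens.length) (hdd : tokens.drop i = [a]) :
    pvLoopB tokens i out = pvLoopB tokens (i + 1) (out ++ [a]) := by
  have hs : PySem.List.slice tokens (some (i : Int)) (some ((i : Int) + 3)) = [a] := by
    have hgen := PySem.List.slice_natCast_add tokens i 3
    push_cast at hgen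
    rw [hgen, hdd]; rfl
  conv_lhs => rw [pvLoopB.eq_def]
  simp only [dif_pos h, hs]

-- A's inner scan over the sorted phrase list, characterised over the suffix tokens.drop i
theorem pvFindA_char (tokens : List String) (i : Nat) :
    pvFindA tokens i pvPhrasePartsA =
      match (tokens.drop i).take 3 with
      | [a, b, c] =>
          if a = "HOW" ∧ b = "ARE" ∧ c = "YOU" then some ("HOW_ARE_YOU", 3)
          else if a = "THANK" ∧ b = "YOU" then some ("THANK_YOU", 2)
          else if a = "GOOD" ∧ b = "MORNING" then some ("GOOD_MORNING", 2)
          else if a = "GOOD" ∧ b = "NIGHT" then some ("GOOD_NIGHT", 2)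
          else none
      | [a, b] =>
          if a = "THANK" ∧ b = "YOU" then some ("THANK_YOU", 2)
          else if a = "GOOD" ∧ b = "MORNING" then some ("GOOD_MORNING", 2)
          else if a = "GOOD" ∧ b = "NIGHT" then some ("GOOD_NIGHT", 2)
          else none
      | _ => none := by
  have hA : pvPhrasePartsA =
      [(["HOW", "ARE", "YOU"], "HOW_ARE_YOU"),
       (["THANK", "YOU"], "THANK_YOU"),
       (["GOOD", "MORNING"], "GOOD_MORNING"),
       (["GOOD", "NIGHT"], "GOOD_NIGHT")] := by decide
  have hs3 : PySem.List.slice tokens (some (i : Int)) (some ((i : Int) + 3)) =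
      (tokens.drop i).take 3 := by
    have hgen := PySem.List.slice_natCast_add tokens i 3; push_cast at hgen; exact hgen
  have hs2 : PySem.List.slice tokens (some (i : Int)) (some ((i : Int) + 2)) =
      (tokens.drop i).take 2 := by
    have hgen := PySem.List.slice_natCast_add tokens i 2; push_cast at hgen; exact hgen
  have hdl : (tokens.drop i).length = tokens.length - i := by simp
  rw [hA]
  simp only [pvFindA, List.length_cons, List.length_nil, Nat.reduceAdd, Nat.cast_ofNat,
    Nat.zero_add, hs3, hs2]
  rcases hdd : tokens.drop i with _ | ⟨a, _ | ⟨b, _ | ⟨c, r⟩⟩⟩ <;> rw [hdd] at hdl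
  · have h3 : ¬ (i + 3 ≤ tokens.length) := by simp at hdl; omega
    have h2 : ¬ (i + 2 ≤ tokens.length) := by simp at hdl; omega
    simp [h3, h2]
  · have h3 : ¬ (i + 3 ≤ tokens.length) := by simp at hdl; omega
    have h2 : ¬ (i + 2 ≤ tokens.length) := by simp at hdl; omega
    simp [h3, h2]
  · have h3 : ¬ (i + 3 ≤ tokens.length) := by simp at hdl; omega
    have h2 : i + 2 ≤ tokens.length := by simp at hdl; omega
    simp only [List.take_succ_cons, List.take_nil, h3, false_and, if_false, h2, true_and]
    split_ifs <;> simp_all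
  · have h3 : i + 3 ≤ tokens.length := by simp at hdl; omega
    have h2 : i + 2 ≤ tokens.length := by omega
    rw [show List.take 3 (a :: b :: c :: r) = [a, b, c] from rfl,
      show List.take 2 (a :: b :: c :: r) = [a, b] from rfl]
    simp only [h3, h2, true_and]
    split_ifs <;> simp_all

-- A's indexed while loop equals B's windowed decision-tree loop
theorem pvLoop_eq_aux (k : Nat) : ∀ (tokens : List String) (i : Nat) (out : List String),
    tokens.length - i ≤ k → pvLoopA tokens i out = pvLoopB tokens i out := by
  induction k with
  | zero =>
    intro tokens i out hk
    have hni : ¬ i < tokens.length := by omega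
    rw [pvLoopA, pvLoopB]
    simp [hni]
  | succ k ih =>
    intro tokens i out hk
    by_cases h : i < tokens.length
    · have hdl : (tokens.drop i).length = tokens.length - i := by simp
      have hget : (PySem.List.pyGet? tokens (i : Int)).getD "" = ((tokens.drop i).head?).getD "" := by
        rw [PySem.List.pyGet?_natCast, ← List.head?_drop]
      have hchar := pvFindA_char tokens i
      rcases hdd : tokens.drop i with _ | ⟨a, _ | ⟨b, _ | ⟨c, r⟩⟩⟩ <;> rw [hdd] at hdl hchar hget <;>
        simp only [List.length_cons, List.length_nil] at hdl
      · exfalso; omega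
      · simp only [List.take_succ_cons, List.take_nil] at hchar
        rw [pvLoopA]; simp only [dif_pos h]
        rw [pvLoopB_char1 tokens i out a h hdd]
        rcases hf2 : pvFindA tokens i pvPhrasePartsA with _ | ⟨repl, n⟩
        · rw [hget]
          simp only [List.head?_cons, Option.getD_some]
          exact ih tokens (i + 1) _ (by omega)
        · rw [hf2] at hchar; exact absurd hchar (by simp)
      · simp only [List.take_succ_cons, List.take_nil] at hchar
        rw [pvLoopA]; simp only [dif_pos h]
        rw [pvLoopB_char2 tokens i out a b h hdd]
        rcases hf2 : pvFindA tokens i pvPhrasePartsA with _ | ⟨repl, n⟩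
        · rw [hf2] at hchar
          split_ifs at hchar ⊢ with g1 g2 g3
          rw [hget]
          simp only [List.head?_cons, Option.getD_some]
          exact ih tokens (i + 1) _ (by omega)
        · rw [hf2] at hchar
          split_ifs at hchar ⊢ with g1 g2 g3
          · simp only [Option.some.injEq, Prod.mk.injEq] at hchar
            obtain ⟨rfl, rfl⟩ := hchar
            show pvLoopA tokens (i + 2) _ = _
            exact ih tokens (i + 2) _ (by omega)
          · simp only [Option.some.injEq, Prod.mk.injEq] at hchar
            obtain ⟨rfl, rfl⟩ := hchar
            show pvLoopA tokens (i + 2) _ = _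
            exact ih tokens (i + 2) _ (by omega)
          · simp only [Option.some.injEq, Prod.mk.injEq] at hchar
            obtain ⟨rfl, rfl⟩ := hchar
            show pvLoopA tokens (i + 2) _ = _
            exact ih tokens (i + 2) _ (by omega)
      · simp only [List.take_succ_cons, List.take_zero] at hchar
        rw [pvLoopA]; simp only [dif_pos h]
        rw [pvLoopB_char3 tokens i out a b c r h hdd]
        rcases hf2 : pvFindA tokens i pvPhrasePartsA with _ | ⟨repl, n⟩
        · rw [hf2] at hchar
          split_ifs at hchar ⊢ with g1 g2 g3 g4
          rw [hget]
          simp only [List.head?_cons, Option.getD_some]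
          exact ih tokens (i + 1) _ (by omega)
        · rw [hf2] at hchar
          split_ifs at hchar ⊢ with g1 g2 g3 g4
          · simp only [Option.some.injEq, Prod.mk.injEq] at hchar
            obtain ⟨rfl, rfl⟩ := hchar
            show pvLoopA tokens (i + 3) _ = _
            exact ih tokens (i + 3) _ (by omega)
          · simp only [Option.some.injEq, Prod.mk.injEq] at hchar
            obtain ⟨rfl, rfl⟩ := hchar
            show pvLoopA tokens (i + 2) _ = _
            exact ih tokens (i + 2) _ (by omega)
          · simp only [Option.some.injEq, Prod.mk.injEq] at hchar
            obtain ⟨rfl, rfl⟩ := hchar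
            show pvLoopA tokens (i + 2) _ = _
            exact ih tokens (i + 2) _ (by omega)
          · simp only [Option.some.injEq, Prod.mk.injEq] at hchar
            obtain ⟨rfl, rfl⟩ := hchar
            show pvLoopA tokens (i + 2) _ = _
            exact ih tokens (i + 2) _ (by omega)
    · rw [pvLoopA, pvLoopB]
      simp [h]

-- ===== VERDICT (by name: the statement is the Claim_ definition above) =====
theorem apply_phrases_spec : Claim_equal_apply_phrases := by
  intro tokens _
  unfold Spec_apply_phrases apply_phrases apply_phrases_alt
  split
  · subst tokens; rw [pvLoopB]; simp
  · exact pvLoop_eq_aux tokens.length tokens 0 [] (by omega)
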